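-- pv_equiv track=rewrite | github.com/uxprogrammer-dev/optcg-builder | ml/datasets/intent_data.py | _extract_colors_from_prompt
-- ===== SOURCE A (Python) =====
-- from typing import Dict, List, Set
--
-- COLORS = ["red", "blue", "green", "yellow", "purple", "black"]
--
-- def _normalize_text(text: str) -> str:
--     """Normalize text for keyword matching."""
--     return text.lower().replace(".", " ").replace("-", " ").strip()
--
-- def _tokenize(text: str) -> List[str]:
--     """Tokenize text into words."""
--     normalized = _normalize_text(text)
--     # Split on whitespace and filter empty strings
--     tokens = [t.strip() for t in normalized.split() if t.strip()]
--     return tokens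
--
-- def _extract_colors_from_prompt(prompt: str) -> List[str]:
--     """
--     Extract color mentions from prompt.
--     """
--     normalized_prompt = _normalize_text(prompt)
--     prompt_tokens = set(_tokenize(normalized_prompt))
--
--     matched_colors: List[str] = []
--     for color in COLORS:
--         if color in prompt_tokens or color in normalized_prompt:
--             matched_colors.append(color)
--
--     return matched_colors
-- ===== SOURCE B (Python) =====
-- from typing import List
--
-- COLORS = ["red", "blue", "green", "yellow", "purple", "black"]
--
-- def _normalize_text(text: str) -> str:
--     """Normalize text for keyword matching."""
--     return text.lower().replace(".", " ").replace("-", " ").strip()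
--
-- def _extract_colors_from_prompt(prompt: str) -> List[str]:
--     """Extract color mentions from prompt: one left-to-right scan of the
--     normalized prompt, recording every color word that starts at each position,
--     then keep COLORS order."""
--     s = _normalize_text(prompt)
--     found = set()
--     for i in range(len(s)):
--         for color in COLORS:
--             if s.startswith(color, i):
--                 found.add(color)
--     return [c for c in COLORS if c in found]
-- ===== Notes on version B (the rewrite author's own statement) =====
-- stated objective: alternative
-- what changed: B drops A's redundant token set and per-color substring searches and instead makes one left-to-right scan over the normalized prompt, testing at each position which color word starts there, collecting hits in a set and finally filtering COLORS by membership to keep order and dedup.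
import Mathlib
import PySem

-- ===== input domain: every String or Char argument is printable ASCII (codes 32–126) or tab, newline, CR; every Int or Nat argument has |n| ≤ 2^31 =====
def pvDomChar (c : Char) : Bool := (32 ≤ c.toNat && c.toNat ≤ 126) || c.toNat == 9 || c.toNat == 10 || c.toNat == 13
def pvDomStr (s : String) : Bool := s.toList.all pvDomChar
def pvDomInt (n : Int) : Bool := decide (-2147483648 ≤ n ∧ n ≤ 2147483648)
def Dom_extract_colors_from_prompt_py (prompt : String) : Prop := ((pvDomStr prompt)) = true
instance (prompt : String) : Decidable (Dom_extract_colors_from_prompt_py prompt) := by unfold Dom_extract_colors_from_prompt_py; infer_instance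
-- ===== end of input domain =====

-- B replaces A's per-color substring searches plus redundant token set by a single
-- positional scan of the normalized prompt (alternative decomposition, same cost).


-- ===== PORT A =====
-- COLORS (module constant, shared by both ports)
def pvCOLORS : List String := ["red", "blue", "green", "yellow", "purple", "black"]

-- _normalize_text (module helper, shared by both ports)
def pv_normalize_text (text : String) : String :=
  PySem.Str.strip (PySem.Str.replace (PySem.Str.replace (PySem.Str.lower text) "." " ") "-" " ")

-- _tokenize: [t.strip() for t in normalized.split() if t.strip()]
def pv_tokenize (text : String) : List String :=
  let normalized := pv_normalize_text text
  ((PySem.Str.split₀ normalized).filter (fun t => PySem.Str.strip t ≠ "")).map PySem.Str.strip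

def extract_colors_from_prompt_py (prompt : String) : List String :=
  let normalized_prompt := pv_normalize_text prompt
  let prompt_tokens : PySem.Set String := PySem.Set.ofList (pv_tokenize normalized_prompt)
  pvCOLORS.foldl
    (fun matched_colors color =>
      if prompt_tokens.contains color || PySem.Str.isIn color normalized_prompt then
        matched_colors ++ [color]
      else matched_colors) []

-- ===== PORT B =====
-- hand port of Python's s.startswith(p, i) for a Nat start index i (exact there:
-- for 0 ≤ i, s.startswith(p, i) is "p is a prefix of s[i:]")
def pvStartswithFrom (s p : String) (i : Nat) : Bool :=
  PySem.Chars.startswith (s.toList.drop i) p.toList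

def extract_colors_from_prompt_py_alt (prompt : String) : List String :=
  let s := pv_normalize_text prompt
  let found : PySem.Set String :=
    (List.range (PySem.Str.len s).toNat).foldl
      (fun found i =>
        pvCOLORS.foldl
          (fun found color =>
            if pvStartswithFrom s color i then PySem.Set.add found color else found)
          found)
      PySem.Set.empty
  pvCOLORS.filter (fun c => found.contains c)

-- ===== PRECONDITION & SPEC =====
def Spec_extract_colors_from_prompt_py (prompt : String) (out : List String) : Prop := out = extract_colors_from_prompt_py_alt prompt
instance (prompt : String) (out : List String) : Decidable (Spec_extract_colors_from_prompt_py prompt out) := by unfold Spec_extract_colors_from_prompt_py; infer_instance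

-- ===== CLAIM (what is proved, stated in full; the proofs are below) =====
def Claim_equal_extract_colors_from_prompt_py : Prop := ∀ (prompt : String), Dom_extract_colors_from_prompt_py prompt → Spec_extract_colors_from_prompt_py prompt (extract_colors_from_prompt_py prompt)

-- ===== LEMMAS AND PROOFS =====

-- dropWhile is idempotent
theorem pv_dropWhile_idem {α : Type} (p : α → Bool) (l : List α) :
    List.dropWhile p (List.dropWhile p l) = List.dropWhile p l := by
  induction l with
  | nil => rfl
  | cons a t ih =>
    by_cases h : p a = true
    · simp [List.dropWhile_cons, h, ih]
    · simp [List.dropWhile_cons, h]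

-- every piece produced by split₀.go is an old piece or an infix of cur.reverse ++ s
theorem pv_split_go_infix (s : List Char) : ∀ (cur : List Char) (acc : List (List Char))
    (piece : List Char), piece ∈ PySem.Chars.split₀.go s cur acc →
    piece ∈ acc ∨ piece <:+: (cur.reverse ++ s) := by
  induction s with
  | nil =>
    intro cur acc piece h
    by_cases hc : cur.isEmpty = true
    · simp [PySem.Chars.split₀.go, hc] at h
      exact Or.inl h
    · simp [PySem.Chars.split₀.go, hc] at h
      rcases h with h | h
      all_goals first
        | exact Or.inl h
        | (right; exact ⟨[], [], by simp [h]⟩)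
  | cons c rest ih =>
    intro cur acc piece h
    by_cases hs : PySem.Chars.isspace c = true
    · by_cases hc : cur.isEmpty = true
      · simp only [PySem.Chars.split₀.go, hs, hc, if_true] at h
        rcases ih [] acc piece h with h' | h'
        · exact Or.inl h'
        · right
          exact h'.trans ⟨cur.reverse ++ [c], [], by simp⟩
      · simp only [PySem.Chars.split₀.go, hs, hc, if_true, if_false] at h
        rcases ih [] (cur.reverse :: acc) piece h with h' | h'
        · rcases List.mem_cons.mp h' with h'' | h''
          · right; exact ⟨[], c :: rest, by simp [h'']⟩
          · exact Or.inl h''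
        · right
          exact h'.trans ⟨cur.reverse ++ [c], [], by simp⟩
    · simp only [PySem.Chars.split₀.go, hs, if_false] at h
      rcases ih (c :: cur) acc piece h with h' | h'
      · exact Or.inl h'
      · right
        simpa using h'
theorem pv_split₀_infix (s piece : List Char) (h : piece ∈ PySem.Chars.split₀ s) :
    piece <:+: s := by
  rcases pv_split_go_infix s [] [] piece h with h' | h'
  · simp at h'
  · simpa using h'

-- strip is an infix of its argument
theorem pv_lstrip_suffix (s : List Char) : PySem.Chars.lstrip s <:+ s :=
  List.dropWhile_suffix _
theorem pv_rstrip_prefix (s : List Char) : PySem.Chars.rstrip s <+: s := by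
  have h := List.dropWhile_suffix (l := s.reverse) (p := PySem.Chars.isspace)
  unfold PySem.Chars.rstrip
  rcases h with ⟨t, ht⟩
  exact ⟨t.reverse, by rw [← List.reverse_append, ht, List.reverse_reverse]⟩
theorem pv_strip_infix (s : List Char) : PySem.Chars.strip s <:+: s :=
  ((pv_rstrip_prefix (PySem.Chars.lstrip s)).isInfix).trans (pv_lstrip_suffix s).isInfix

-- replace.go only produces characters of l, acc or new
theorem pv_replace_go_mem (old new : List Char) (a : Char) :
    ∀ (fuel : Nat) (l acc : List Char), a ∈ PySem.Chars.replace.go old new fuel l acc →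
    a ∈ l ∨ a ∈ acc ∨ a ∈ new := by
  intro fuel
  induction fuel with
  | zero => intro l acc h; simp [PySem.Chars.replace.go] at h; tauto
  | succ fuel ih =>
    intro l acc h
    match l with
    | [] => simp [PySem.Chars.replace.go] at h; tauto
    | c :: t =>
      by_cases hp : old.isPrefixOf (c :: t) = true
      · simp only [PySem.Chars.replace.go, hp, if_true] at h
        rcases ih _ _ h with h' | h' | h'
        · exact Or.inl (List.mem_of_mem_drop h')
        · simp at h'; tauto
        · tauto
      · simp only [PySem.Chars.replace.go, hp, if_false] at h
        rcases ih _ _ h with h' | h' | h'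
        · exact Or.inl (List.mem_cons_of_mem _ h')
        · simp at h'
          rcases h' with h' | h'
          · exact Or.inl (by simp [h'])
          · tauto
        · tauto
theorem pv_replace_mem (s old new : List Char) (a : Char) (hold : old ≠ [])
    (h : a ∈ PySem.Chars.replace s old new) : a ∈ s ∨ a ∈ new := by
  unfold PySem.Chars.replace at h
  rw [if_neg (by simpa using hold)] at h
  rcases pv_replace_go_mem old new a s.length s [] h with h' | h' | h'
  · exact Or.inl h'
  · simp at h'
  · exact Or.inr h'

-- replacing a single absent character is a no-op
theorem pv_replace_go_not_mem (b : Char) (new : List Char) :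
    ∀ (fuel : Nat) (l acc : List Char), b ∉ l →
    PySem.Chars.replace.go [b] new fuel l acc = acc.reverse ++ l := by
  intro fuel
  induction fuel with
  | zero => intro l acc _; simp [PySem.Chars.replace.go]
  | succ fuel ih =>
    intro l acc hb
    match l with
    | [] => simp [PySem.Chars.replace.go]
    | c :: t =>
      have hcb : c ≠ b := fun h => hb (by simp [h])
      have hp : ([b].isPrefixOf (c :: t)) = false := by
        simp only [List.isPrefixOf, Bool.and_eq_true, beq_iff_eq]
        simp [Ne.symm hcb]
      simp only [PySem.Chars.replace.go, hp, if_false]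
      rw [ih t (c :: acc) (fun h => hb (List.mem_cons_of_mem _ h))]
      simp
theorem pv_replace_not_mem (s new : List Char) (b : Char) (hb : b ∉ s) :
    PySem.Chars.replace s [b] new = s := by
  unfold PySem.Chars.replace
  rw [if_neg (by simp)]
  simpa using pv_replace_go_not_mem b new s.length s [] hb

-- replacing every b by a non-b character removes b entirely
theorem pv_replace_go_removes (b : Char) (new : List Char) (hbn : b ∉ new) :
    ∀ (fuel : Nat) (l acc : List Char), l.length ≤ fuel → b ∉ acc →
    b ∉ PySem.Chars.replace.go [b] new fuel l acc := by
  intro fuel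
  induction fuel with
  | zero =>
    intro l acc hlen hacc
    have : l = [] := List.eq_nil_of_length_eq_zero (Nat.le_zero.mp hlen)
    simp [PySem.Chars.replace.go, this, hacc]
  | succ fuel ih =>
    intro l acc hlen hacc
    match l with
    | [] => simp [PySem.Chars.replace.go, hacc]
    | c :: t =>
      by_cases hp : ([b].isPrefixOf (c :: t)) = true
      · simp only [PySem.Chars.replace.go, hp, if_true]
        apply ih _ _ (by simpa using Nat.le_of_succ_le_succ hlen)
        simp [hacc, hbn]
      · simp only [PySem.Chars.replace.go, hp, if_false]
        have hcb : c ≠ b := by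
          intro h; apply hp; simp [List.isPrefixOf, h]
        apply ih _ _ (Nat.le_of_succ_le_succ (by simpa using hlen))
        simp only [List.mem_cons, not_or]
        exact ⟨fun h => hcb h.symm, hacc⟩
theorem pv_replace_removes (s new : List Char) (b : Char) (hbn : b ∉ new) :
    b ∉ PySem.Chars.replace s [b] new := by
  unfold PySem.Chars.replace
  rw [if_neg (by simp)]
  exact pv_replace_go_removes b new hbn s.length s [] le_rfl (by simp)

-- lowerChar is idempotent on characters below 127 (the Dom alphabet)
set_option maxHeartbeats 1000000 in
theorem pv_lowerChar_small (c : Char) (h : c.toNat < 127) :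
    (PySem.Chars.lowerChar c).toNat < 127 ∧
      PySem.Chars.lowerChar (PySem.Chars.lowerChar c) = PySem.Chars.lowerChar c := by
  have hall : ∀ n < 127, (PySem.Chars.lowerChar (Char.ofNat n)).toNat < 127 ∧
      PySem.Chars.lowerChar (PySem.Chars.lowerChar (Char.ofNat n)) =
        PySem.Chars.lowerChar (Char.ofNat n) := by decide
  have hc : Char.ofNat c.toNat = c := Char.ofNat_toNat c
  have := hall c.toNat h
  rwa [hc] at this

-- strip is a no-op on an already-stripped list
theorem pv_lstrip_rstrip (w : List Char) (hw : PySem.Chars.lstrip w = w) :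
    PySem.Chars.lstrip (PySem.Chars.rstrip w) = PySem.Chars.rstrip w := by
  rcases pv_rstrip_prefix w with ⟨t, ht⟩
  cases hv : PySem.Chars.rstrip w with
  | nil => simp [PySem.Chars.lstrip]
  | cons a u =>
    rw [hv] at ht
    have hns : PySem.Chars.isspace a = false := by
      by_contra hcontra
      rw [Bool.not_eq_false] at hcontra
      have h2 : PySem.Chars.lstrip w = List.dropWhile PySem.Chars.isspace (u ++ t) := by
        rw [← ht]
        unfold PySem.Chars.lstrip
        simp [List.dropWhile_cons, hcontra]
      rw [hw] at h2
      have hlen2 := congrArg List.length h2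
      have hle := List.length_dropWhile_le (p := PySem.Chars.isspace) (l := u ++ t)
      rw [← ht] at hlen2
      simp at hlen2 hle
      omega
    unfold PySem.Chars.lstrip
    simp [List.dropWhile_cons, hns]
theorem pv_strip_idem (s : List Char) :
    PySem.Chars.strip (PySem.Chars.strip s) = PySem.Chars.strip s := by
  have h1 : PySem.Chars.lstrip (PySem.Chars.lstrip s) = PySem.Chars.lstrip s :=
    pv_dropWhile_idem _ _
  unfold PySem.Chars.strip
  rw [pv_lstrip_rstrip _ h1]
  unfold PySem.Chars.rstrip
  rw [List.reverse_reverse, pv_dropWhile_idem]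

-- the normalized prompt is unchanged by a second normalization (Dom prompts)
theorem pv_normalize_idem (p : String) (hdom : pvDomStr p = true) :
    pv_normalize_text (pv_normalize_text p) = pv_normalize_text p := by
  set L := PySem.Chars.lower p.toList with hL
  have hLchars : ∀ c ∈ L, c.toNat < 127 ∧ PySem.Chars.lowerChar c = c := by
    intro c hc
    rw [hL] at hc
    unfold PySem.Chars.lower at hc
    rcases List.mem_map.mp hc with ⟨d, hd, hdc⟩
    unfold pvDomStr at hdom
    have h1 := (List.all_eq_true.mp hdom) d hd
    unfold pvDomChar at h1
    have hdn : d.toNat < 127 := by simp at h1; omega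
    have h2 := pv_lowerChar_small d hdn
    exact ⟨hdc ▸ h2.1, hdc ▸ h2.2⟩
  set R1 := PySem.Chars.replace L ['.'] [' '] with hR1
  set R2 := PySem.Chars.replace R1 ['-'] [' '] with hR2
  set np := PySem.Chars.strip R2 with hnp
  have hnp_sub : ∀ c ∈ np, c ∈ R2 := fun c hc => (pv_strip_infix R2).subset hc
  have hR2chars : ∀ c ∈ R2, c = ' ' ∨ c ∈ L := by
    intro c hc
    rcases pv_replace_mem R1 ['-'] [' '] c (by simp) hc with h | h
    · rcases pv_replace_mem L ['.'] [' '] c (by simp) h with h' | h'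
      · exact Or.inr h'
      · simp at h'; exact Or.inl h'
    · simp at h; exact Or.inl h
  have hnodot : ('.' : Char) ∉ R2 := by
    intro h
    rcases pv_replace_mem R1 ['-'] [' '] '.' (by simp) h with h' | h'
    · exact pv_replace_removes L [' '] '.' (by decide) h'
    · simp at h'
  have hnodash : ('-' : Char) ∉ R2 := pv_replace_removes R1 [' '] '-' (by decide)
  have hlower : PySem.Chars.lower np = np := by
    unfold PySem.Chars.lower
    have h := List.map_congr_left (l := np) (f := PySem.Chars.lowerChar) (g := id)
      (fun c hc => by
        rcases hR2chars c (hnp_sub c hc) with h | h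
        · rw [h]; decide
        · exact (hLchars c h).2)
    rw [h, List.map_id]
  have hkey : (pv_normalize_text p).toList = np := by
    unfold pv_normalize_text
    rw [PySem.Str.toList_strip, PySem.Str.toList_replace, PySem.Str.toList_replace,
      PySem.Str.toList_lower]
    rfl
  have hmain : ∀ (q : String), q.toList = np → (pv_normalize_text q).toList = np := by
    intro q hq
    unfold pv_normalize_text
    rw [PySem.Str.toList_strip, PySem.Str.toList_replace, PySem.Str.toList_replace,
      PySem.Str.toList_lower, hq,
      show (".".toList) = ['.'] from rfl, show ("-".toList) = ['-'] from rfl,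
      show (" ".toList) = [' '] from rfl, hlower,
      pv_replace_not_mem np [' '] '.' (fun h => hnodot (hnp_sub _ h)),
      pv_replace_not_mem np [' '] '-' (fun h => hnodash (hnp_sub _ h)), hnp]
    exact pv_strip_idem R2
  rw [← String.toList_inj, hmain (pv_normalize_text p) hkey, hkey]

-- every token of A is a substring of the normalized prompt
theorem pv_token_isIn (p : String) (hdom : pvDomStr p = true) (c : String)
    (hc : c ∈ pv_tokenize (pv_normalize_text p)) :
    PySem.Str.isIn c (pv_normalize_text p) = true := by
  unfold pv_tokenize at hc
  rw [pv_normalize_idem p hdom] at hc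
  simp only [List.mem_map, List.mem_filter] at hc
  rcases hc with ⟨t0, ⟨ht0, -⟩, rfl⟩
  have ht0' : t0.toList ∈ PySem.Chars.split₀ (pv_normalize_text p).toList := by
    rw [← PySem.Str.split₀_map_toList]
    exact List.mem_map_of_mem ht0
  have h1 : t0.toList <:+: (pv_normalize_text p).toList := pv_split₀_infix _ _ ht0'
  have h2 : (PySem.Str.strip t0).toList <:+: t0.toList := by
    rw [PySem.Str.toList_strip]
    exact pv_strip_infix _
  rw [PySem.Str.isIn_iff_infix]
  exact h2.trans h1

-- membership in B's found-set
theorem pv_found_inner (s : String) (i : Nat) (L : List String) (f : PySem.Set String)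
    (x : String) : x ∈ L.foldl (fun f c => if pvStartswithFrom s c i then PySem.Set.add f c else f) f ↔
      x ∈ f ∨ (x ∈ L ∧ pvStartswithFrom s x i = true) := by
  induction L generalizing f with
  | nil => simp
  | cons a t ih =>
    by_cases h : pvStartswithFrom s a i = true
    · simp only [List.foldl_cons, h, if_true]
      rw [ih]
      rw [PySem.Set.mem_add]
      constructor
      · rintro (h' | h') 
        · rcases h' with h' | h'
          · exact Or.inl h'
          · exact Or.inr ⟨by simp [h'], h' ▸ h⟩
        · exact Or.inr ⟨List.mem_cons_of_mem _ h'.1, h'.2⟩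
      · rintro (h' | ⟨h1, h2⟩)
        · exact Or.inl (Or.inl h')
        · rcases List.mem_cons.mp h1 with h1 | h1
          · exact Or.inl (Or.inr h1)
          · exact Or.inr ⟨h1, h2⟩
    · simp only [List.foldl_cons, h, if_false]
      rw [ih]
      constructor
      · rintro (h' | ⟨h1, h2⟩)
        · exact Or.inl h'
        · exact Or.inr ⟨List.mem_cons_of_mem _ h1, h2⟩
      · rintro (h' | ⟨h1, h2⟩)
        · exact Or.inl h'
        · rcases List.mem_cons.mp h1 with h1 | h1
          · exact absurd (h1 ▸ h2) h
          · exact Or.inr ⟨h1, h2⟩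

theorem pv_found_mem (s : String) (is : List Nat) (f : PySem.Set String) (x : String) :
    x ∈ is.foldl (fun f i => pvCOLORS.foldl
        (fun f c => if pvStartswithFrom s c i then PySem.Set.add f c else f) f) f ↔
      x ∈ f ∨ (x ∈ pvCOLORS ∧ ∃ i ∈ is, pvStartswithFrom s x i = true) := by
  induction is generalizing f with
  | nil => simp
  | cons j t ih =>
    simp only [List.foldl_cons]
    rw [ih]
    rw [pv_found_inner]
    constructor
    · rintro ((h | ⟨h1, h2⟩) | ⟨h1, h2⟩)
      · exact Or.inl h
      · exact Or.inr ⟨h1, j, by simp, h2⟩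
      · rcases h2 with ⟨i, hi, h3⟩
        exact Or.inr ⟨h1, i, List.mem_cons_of_mem _ hi, h3⟩
    · rintro (h | ⟨h1, i, hi, h3⟩)
      · exact Or.inl (Or.inl h)
      · rcases List.mem_cons.mp hi with hi | hi
        · exact Or.inl (Or.inr ⟨h1, hi ▸ h3⟩)
        · exact Or.inr ⟨h1, i, hi, h3⟩

-- bounded positional scan finds c exactly when c is a substring (c nonempty)
theorem pv_scan_iff (s c : String) (hc : c.toList ≠ []) :
    (∃ i ∈ List.range (PySem.Str.len s).toNat, pvStartswithFrom s c i = true) ↔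
      PySem.Str.isIn c s = true := by
  have hlen : (PySem.Str.len s).toNat = s.toList.length := by
    rw [PySem.Str.len_eq, Int.toNat_natCast]
  rw [PySem.Str.isIn_eq, ← PySem.Chars.exists_prefix_drop_iff_isIn]
  constructor
  · rintro ⟨i, -, hi⟩
    unfold pvStartswithFrom PySem.Chars.startswith at hi
    exact ⟨i, List.isPrefixOf_iff_prefix.mp hi⟩
  · rintro ⟨j, hj⟩
    by_cases hjl : j < s.toList.length
    · refine ⟨j, List.mem_range.mpr (by omega), ?_⟩
      unfold pvStartswithFrom PySem.Chars.startswith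
      exact List.isPrefixOf_iff_prefix.mpr hj
    · rw [List.drop_eq_nil_of_le (by omega)] at hj
      exact absurd (List.prefix_nil.mp hj) hc

-- ===== VERDICT (by name: the statement is the Claim_ definition above) =====
theorem extract_colors_from_prompt_py_spec : Claim_equal_extract_colors_from_prompt_py := by
  intro prompt hdom
  unfold Spec_extract_colors_from_prompt_py
  simp only [extract_colors_from_prompt_py, extract_colors_from_prompt_py_alt]
  rw [PySem.List.foldl_append_if_eq_filter, List.nil_append]
  apply List.filter_congr
  intro c hcmem
  have hcne : c.toList ≠ [] := by
    have h := hcmem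
    unfold pvCOLORS at h
    simp only [List.mem_cons, List.not_mem_nil, or_false] at h
    rcases h with rfl | rfl | rfl | rfl | rfl | rfl <;> decide
  rw [Bool.eq_iff_iff]
  have hdom' : pvDomStr prompt = true := hdom
  simp only [PySem.Set.contains]
  rw [List.contains_iff_mem, pv_found_mem]
  constructor
  · intro h
    have hin : PySem.Str.isIn c (pv_normalize_text prompt) = true := by
      rcases (Bool.or_eq_true _ _).mp h with h' | h'
      · exact pv_token_isIn prompt hdom' c
          ((PySem.Set.mem_ofList _ _).mp (List.contains_iff_mem.mp h'))
      · exact h'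
    right
    exact ⟨hcmem, (pv_scan_iff _ c hcne).mpr hin⟩
  · intro h
    rcases h with h | ⟨-, hex⟩
    · exact absurd h (by simp [PySem.Set.empty])
    · exact (Bool.or_eq_true _ _).mpr (Or.inr ((pv_scan_iff _ c hcne).mp hex))
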